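-- pv_equiv track=rewrite | github.com/koura911/ECE_562_project | hybrid_branch_predictor_simulation.py | saturatingCounter
-- ===== SOURCE A (Python) =====
-- class Counter:
--     def __init__(self):
--         # start at weakly taken
--         self.state = 3
--
--     def predict(self):
--         # if in a not taken state, return not taken
--         if self.state < 3:
--             return 0
--         # return taken
--         else:
--             return 1
--
--     def update(self, actual):
--         # if branch was taken, increment state
--         if actual == 1:
--             if self.state != 4:
--                 self.state += 1
--         # branch not taken, decrement state
--         else:
--             if self.state != 1:
--                 self.state -= 1
--
-- def saturatingCounter(trace, l):
--     # variable for the counter for each branch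
--     counter_list = {}
--     # variable for counting correct predictions
--     correct = 0
--
--     # for all the branches
--     for branch in trace:
--         # if the branch does not have a counter, add one to the list
--         if branch[0] not in counter_list:
--             counter_list[branch[0]] = Counter()
--
--         # make prediction
--         prediction = counter_list[branch[0]].predict()
--         # update the counter using whether or not the branch was actually taken or not
--         counter_list[branch[0]].update(branch[1])
--
--         # if we match, count as correct prediction
--         if prediction == branch[1]:
--             correct += 1
--
--     return correct
-- ===== SOURCE B (Python) =====
-- def saturatingCounter(trace, l):
--     # Phase 1: group the actual outcomes by branch address, preserving per-branch order.
--     outcomes = {}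
--     for key, actual in trace:
--         outcomes.setdefault(key, []).append(actual)
--     # Phase 2: run the 2-bit saturating counter over each branch's outcome list.
--     correct = 0
--     for seq in outcomes.values():
--         state = 3
--         for actual in seq:
--             prediction = 1 if state >= 3 else 0
--             if prediction == actual:
--                 correct += 1
--             if actual == 1:
--                 if state != 4:
--                     state += 1
--             elif state != 1:
--                 state -= 1
--     return correct
-- ===== Notes on version B (the rewrite author's own statement) =====
-- stated objective: alternative
-- what changed: Replaced the single interleaved loop over the trace (a dict of mutable Counter objects consulted and updated per event) by a two-phase decomposition: one pass grouping each branch's outcomes into an ordered dict of lists, then an independent saturating-counter state machine (a plain local integer) run over each branch's list, summing the hits.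
import Mathlib
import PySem

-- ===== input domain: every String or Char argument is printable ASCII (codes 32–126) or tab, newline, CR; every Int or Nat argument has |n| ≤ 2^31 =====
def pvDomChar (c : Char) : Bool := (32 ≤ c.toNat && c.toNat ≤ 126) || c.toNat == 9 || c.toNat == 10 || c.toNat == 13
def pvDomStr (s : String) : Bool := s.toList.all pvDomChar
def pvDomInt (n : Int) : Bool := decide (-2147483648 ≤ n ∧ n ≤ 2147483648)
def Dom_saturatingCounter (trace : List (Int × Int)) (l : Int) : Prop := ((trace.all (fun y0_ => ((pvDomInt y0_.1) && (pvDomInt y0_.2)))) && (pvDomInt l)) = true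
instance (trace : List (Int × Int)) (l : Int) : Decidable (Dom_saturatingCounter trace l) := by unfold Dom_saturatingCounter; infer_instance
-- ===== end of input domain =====

-- B regroups the trace per branch first and then runs the saturating counter over each
-- branch's outcome list, instead of A's single interleaved loop over a dict of counters.

-- ===== PORT A =====
-- one iteration of A's loop body: lazily create the counter, predict, update, count a hit
def pvAStep (acc : PySem.Dict Int Int × Int) (branch : Int × Int) : PySem.Dict Int Int × Int :=
  let cl := if acc.1.contains branch.1 then acc.1 else acc.1.insert branch.1 3
  let s := cl.getD branch.1 3
  let prediction : Int := if s < 3 then 0 else 1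
  let s' := if branch.2 = 1 then (if s ≠ 4 then s + 1 else s) else (if s ≠ 1 then s - 1 else s)
  (cl.insert branch.1 s', if prediction = branch.2 then acc.2 + 1 else acc.2)

def saturatingCounter (trace : List (Int × Int)) (l : Int) : Int :=
  (trace.foldl pvAStep (PySem.Dict.empty, 0)).2

-- ===== PORT B =====
-- one step of B's inner state machine: (state, correct) updated by one actual outcome
def pvSimStep (sc : Int × Int) (actual : Int) : Int × Int :=
  let prediction : Int := if sc.1 ≥ 3 then 1 else 0
  let correct := if prediction = actual then sc.2 + 1 else sc.2
  let state := if actual = 1 then (if sc.1 ≠ 4 then sc.1 + 1 else sc.1)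
               else (if sc.1 ≠ 1 then sc.1 - 1 else sc.1)
  (state, correct)

def saturatingCounter_alt (trace : List (Int × Int)) (l : Int) : Int :=
  let outcomes := trace.foldl (fun (d : PySem.Dict Int (List Int)) p => d.modify p.1 [] (· ++ [p.2])) PySem.Dict.empty
  outcomes.values.foldl (fun correct seq => (seq.foldl pvSimStep (3, correct)).2) 0

-- ===== PRECONDITION & SPEC =====
def Spec_saturatingCounter (trace : List (Int × Int)) (l : Int) (out : Int) : Prop := out = saturatingCounter_alt trace l
instance (trace : List (Int × Int)) (l : Int) (out : Int) : Decidable (Spec_saturatingCounter trace l out) := by unfold Spec_saturatingCounter; infer_instance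

-- ===== CLAIM (what is proved, stated in full; the proofs are below) =====
def Claim_equal_saturatingCounter : Prop := ∀ (trace : List (Int × Int)) (l : Int), Dom_saturatingCounter trace l → Spec_saturatingCounter trace l (saturatingCounter trace l)

-- ===== LEMMAS AND PROOFS =====

-- outcomes of branch k, in trace order
def pvOutc (k : Int) (trace : List (Int × Int)) : List Int :=
  (trace.filter (fun p => p.1 == k)).map (·.2)

-- hits of the state machine started at state s on a list of outcomes
def pvSim (s : Int) (seq : List Int) : Int := (seq.foldl pvSimStep (s, 0)).2

theorem pvSimStep_split (s c : Int) (a : Int) :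
    pvSimStep (s, c) a = ((pvSimStep (s, 0) a).1, c + (pvSimStep (s, 0) a).2) := by
  simp only [pvSimStep]
  split_ifs <;> simp

theorem pvSim_offset (seq : List Int) : ∀ (s c : Int),
    (seq.foldl pvSimStep (s, c)).2 = c + pvSim s seq := by
  induction seq with
  | nil => intro s c; simp [pvSim]
  | cons a t ih =>
    intro s c
    simp only [List.foldl_cons, pvSim]
    rw [pvSimStep_split s c a, ih, pvSimStep_split s 0 a, ih]
    ring

theorem pvSim_cons (s a : Int) (seq : List Int) :
    pvSim s (a :: seq) = (pvSimStep (s, 0) a).2 + pvSim (pvSimStep (s, 0) a).1 seq := by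
  simp only [pvSim, List.foldl_cons]
  rw [show pvSimStep (s, 0) a = ((pvSimStep (s, 0) a).1, (pvSimStep (s, 0) a).2) from rfl]
  exact pvSim_offset seq _ _

theorem pvOutc_cons_self (k a : Int) (rest : List (Int × Int)) :
    pvOutc k ((k, a) :: rest) = a :: pvOutc k rest := by
  simp [pvOutc]

theorem pvOutc_cons_ne {k k' : Int} (h : k' ≠ k) (a : Int) (rest : List (Int × Int)) :
    pvOutc k' ((k, a) :: rest) = pvOutc k' rest := by
  simp [pvOutc, beq_iff_eq, Ne.symm h]

theorem pvOutc_nil_of_not_mem {k : Int} {rest : List (Int × Int)}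
    (h : k ∉ rest.map Prod.fst) : pvOutc k rest = [] := by
  simp only [pvOutc, List.map_eq_nil_iff, List.filter_eq_nil_iff]
  intro p hp hk
  exact h (List.mem_map.mpr ⟨p, hp, by simpa using hk.symm⟩)

-- A's loop body produces exactly one simulation step on the stored state
theorem pvAStep_state {d : PySem.Dict Int Int} {c : Int} (k a : Int) :
    pvAStep (d, c) (k, a) =
      ((if d.contains k then d else d.insert k 3).insert k
         (pvSimStep ((d.get? k).getD 3, 0) a).1,
       c + (pvSimStep ((d.get? k).getD 3, 0) a).2) := by
  have hs : (if d.contains k then d else d.insert k 3).getD k 3 = (d.get? k).getD 3 := by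
    by_cases h : d.contains k
    · simp [h, PySem.Dict.getD_eq_get?_getD]
    · have hn : d.get? k = none := by
        rw [PySem.Dict.get?_eq_none_iff_contains]; simpa using h
      simp [h, hn, PySem.Dict.getD_insert_self]
  simp only [pvAStep, hs, pvSimStep]
  have hp : (if (d.get? k).getD 3 < 3 then (0:Int) else 1)
      = (if (d.get? k).getD 3 ≥ 3 then (1:Int) else 0) := by split_ifs <;> omega
  rw [hp]
  refine Prod.ext rfl ?_
  split_ifs <;> omega

-- the main invariant for A's loop
theorem pvAloop_eq (trace : List (Int × Int)) : ∀ (d : PySem.Dict Int Int) (c : Int),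
    (trace.foldl pvAStep (d, c)).2 =
      c + ∑ k ∈ (trace.map Prod.fst).toFinset, pvSim ((d.get? k).getD 3) (pvOutc k trace) := by
  induction trace with
  | nil => intro d c; simp
  | cons p rest ih =>
    intro d c
    obtain ⟨k, a⟩ := p
    set s : Int := (d.get? k).getD 3 with hs
    set cl' : PySem.Dict Int Int := (if d.contains k then d else d.insert k 3).insert k (pvSimStep (s, 0) a).1 with hcl'
    have hself : cl'.get? k = some (pvSimStep (s, 0) a).1 := by
      rw [hcl']; exact PySem.Dict.get?_insert_self _ _ _
    have hne : ∀ k' : Int, k' ≠ k → cl'.get? k' = d.get? k' := by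
      intro k' h
      rw [hcl', PySem.Dict.get?_insert_of_ne _ _ h]
      by_cases hc : d.contains k = true
      · rw [if_pos hc]
      · rw [if_neg hc]
        exact PySem.Dict.get?_insert_of_ne _ _ h
    simp only [List.foldl_cons, pvAStep_state k a, ← hs]
    rw [ih cl' (c + (pvSimStep (s, 0) a).2)]
    simp only [List.map_cons, List.toFinset_cons]
    by_cases hk : k ∈ (rest.map Prod.fst).toFinset
    · rw [Finset.insert_eq_self.mpr hk]
      rw [← Finset.add_sum_erase _ _ hk, ← Finset.add_sum_erase _ _ hk]
      have hsum : ∑ k' ∈ ((rest.map Prod.fst).toFinset).erase k,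
            pvSim ((cl'.get? k').getD 3) (pvOutc k' rest)
          = ∑ k' ∈ ((rest.map Prod.fst).toFinset).erase k,
            pvSim ((d.get? k').getD 3) (pvOutc k' ((k, a) :: rest)) := by
        refine Finset.sum_congr rfl ?_
        intro k' hk'
        have h : k' ≠ k := (Finset.mem_erase.mp hk').1
        rw [hne k' h, pvOutc_cons_ne h]
      rw [hsum, hself]
      rw [pvOutc_cons_self, pvSim_cons]
      simp only [Option.getD_some, ← hs]
      ring
    · rw [Finset.sum_insert hk]
      have hsum : ∑ k' ∈ (rest.map Prod.fst).toFinset,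
            pvSim ((cl'.get? k').getD 3) (pvOutc k' rest)
          = ∑ k' ∈ (rest.map Prod.fst).toFinset,
            pvSim ((d.get? k').getD 3) (pvOutc k' ((k, a) :: rest)) := by
        refine Finset.sum_congr rfl ?_
        intro k' hk'
        have h : k' ≠ k := by rintro rfl; exact hk hk'
        rw [hne k' h, pvOutc_cons_ne h]
      rw [hsum]
      have hnil : pvOutc k rest = [] := pvOutc_nil_of_not_mem (by simpa using hk)
      rw [pvOutc_cons_self, pvSim_cons, hnil]
      simp only [pvSim, List.foldl_nil, ← hs]
      ring

theorem pvA_closed (trace : List (Int × Int)) (l : Int) :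
    saturatingCounter trace l = ∑ k ∈ (trace.map Prod.fst).toFinset, pvSim 3 (pvOutc k trace) := by
  unfold saturatingCounter
  rw [pvAloop_eq]
  simp [PySem.Dict.get?_empty]

-- B's outer loop adds pvSim 3 of each value list
theorem pvBfold (vals : List (List Int)) : ∀ (c : Int),
    vals.foldl (fun correct seq => (seq.foldl pvSimStep (3, correct)).2) c
      = c + (vals.map (pvSim 3)).sum := by
  induction vals with
  | nil => intro c; simp
  | cons v t ih =>
    intro c
    simp only [List.foldl_cons, List.map_cons, List.sum_cons]
    rw [ih, pvSim_offset]
    ring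

theorem pvB_closed (trace : List (Int × Int)) (l : Int) :
    saturatingCounter_alt trace l = ∑ k ∈ (trace.map Prod.fst).toFinset, pvSim 3 (pvOutc k trace) := by
  set oc := trace.foldl (fun (d : PySem.Dict Int (List Int)) p => d.modify p.1 [] (· ++ [p.2])) PySem.Dict.empty with hoc
  have h0 : saturatingCounter_alt trace l
      = oc.values.foldl (fun correct seq => (seq.foldl pvSimStep (3, correct)).2) 0 := rfl
  rw [h0]
  have hkeys : oc.keys = PySem.Set.ofList (trace.map Prod.fst) := by
    rw [hoc, PySem.Dict.keys_foldl_modify_key trace Prod.fst [] (fun _ p => (· ++ [p.2]))]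
    rw [PySem.Dict.keys_empty, PySem.Set.ofList_eq_foldl]
    rfl
  have hnodup : oc.keys.Nodup := by rw [hkeys]; exact PySem.Set.nodup_ofList _
  have hget : ∀ k, oc.getD k [] = pvOutc k trace := by
    intro k
    rw [hoc, PySem.Dict.getD_foldl_modify_append]
    simp [PySem.Dict.getD_empty, pvOutc]
  rw [PySem.Dict.values_eq_map_keys oc hnodup []]
  rw [pvBfold, zero_add, List.map_map]
  have hmap : oc.keys.map (pvSim 3 ∘ fun k => oc.getD k []) = oc.keys.map (fun k => pvSim 3 (pvOutc k trace)) :=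
    List.map_congr_left (fun k _ => by simp [hget])
  rw [hmap, ← List.sum_toFinset _ hnodup]
  refine Finset.sum_congr ?_ (fun _ _ => rfl)
  apply Finset.ext
  intro x
  simp [hkeys, PySem.Set.mem_ofList]

-- ===== VERDICT (by name: the statement is the Claim_ definition above) =====
theorem saturatingCounter_spec : Claim_equal_saturatingCounter := by
  intro trace l _
  unfold Spec_saturatingCounter
  rw [pvA_closed, pvB_closed]
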